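-- pv_equiv track=rewrite | github.com/MaratPereverzev/AOIS | Lab3/LogicExtended.py | _removeRedundant
-- ===== SOURCE A (Python) =====
-- from typing import List, Set, Dict
--
-- def _removeRedundant(
--     primes: List[str], original: List[str], forCNF: bool
-- ) -> List[str]:
--     essential = []
--     remaining_terms = original.copy()
--
--     # Находим импликанты, покрывающие уникальные термы
--     for pi in primes:
--         pi_vars = set(pi.split(" | "))
--         covered = []
--
--         for term in remaining_terms:
--             term_vars = set(term.split(" | "))
--             if forCNF:
--                 if pi_vars.issubset(term_vars):
--                     covered.append(term)
--             else:
--                 if term_vars.issubset(pi_vars):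
--                     covered.append(term)
--
--         if covered:
--             essential.append(pi)
--             remaining_terms = [t for t in remaining_terms if t not in covered]
--
--     return essential
-- ===== SOURCE B (Python) =====
-- def _removeRedundant(primes, original, forCNF):
--     # Precompute, for each prime, the set of original terms it covers; then one
--     # forward pass keeping a running set of already-covered terms.
--     def covers(pi_vars, term):
--         term_vars = set(term.split(" | "))
--         return pi_vars <= term_vars if forCNF else term_vars <= pi_vars
--
--     cover = [{t for t in original if covers(set(pi.split(" | ")), t)}
--              for pi in primes]
--     essential = []
--     covered = set()
--     for pi, c in zip(primes, cover):
--         if c - covered: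
--             essential.append(pi)
--             covered |= c
--     return essential
-- ===== Notes on version B (the rewrite author's own statement) =====
-- stated objective: alternative
-- what changed: Replaces the repeatedly re-filtered remaining_terms list with a precomputed per-prime coverage table and a single forward pass maintaining a running covered-set; a prime is kept iff it newly covers some term.
import Mathlib
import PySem

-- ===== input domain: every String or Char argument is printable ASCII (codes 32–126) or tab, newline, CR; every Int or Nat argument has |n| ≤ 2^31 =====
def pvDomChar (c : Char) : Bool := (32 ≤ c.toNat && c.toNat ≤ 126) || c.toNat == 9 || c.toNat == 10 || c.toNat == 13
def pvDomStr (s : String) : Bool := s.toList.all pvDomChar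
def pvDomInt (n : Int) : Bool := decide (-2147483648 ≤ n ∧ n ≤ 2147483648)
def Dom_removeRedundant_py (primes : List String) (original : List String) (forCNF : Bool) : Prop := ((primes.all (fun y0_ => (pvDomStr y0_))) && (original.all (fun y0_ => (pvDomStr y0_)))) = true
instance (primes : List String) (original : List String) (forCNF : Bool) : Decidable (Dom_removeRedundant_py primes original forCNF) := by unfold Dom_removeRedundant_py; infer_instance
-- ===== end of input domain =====

-- B replaces A's repeatedly re-filtered remaining_terms list with a precomputed
-- per-prime coverage table and one forward pass over a running covered-set
-- (objective: alternative decomposition, same cost).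

-- ===== PORT A =====
-- one step of A's outer 'for pi in primes' loop; state = (essential, remaining_terms)
def rrStepA (forCNF : Bool) (st : List String × List String) (pi : String) :
    List String × List String :=
  let piVars : PySem.Set String := PySem.Set.ofList ((PySem.Str.split? pi " | ").getD [])
  let covered := st.2.foldl (fun acc term =>
      let termVars : PySem.Set String := PySem.Set.ofList ((PySem.Str.split? term " | ").getD [])
      if forCNF then
        if PySem.Set.issubset piVars termVars then acc ++ [term] else acc
      else
        if PySem.Set.issubset termVars piVars then acc ++ [term] else acc) []
  if covered ≠ [] then
    (st.1 ++ [pi], st.2.filter (fun t => !(covered.contains t)))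
  else st

def removeRedundant_py (primes : List String) (original : List String) (forCNF : Bool) :
    List String :=
  (primes.foldl (rrStepA forCNF) ([], original)).1

-- ===== PORT B =====
def rrVars (s : String) : PySem.Set String :=
  PySem.Set.ofList ((PySem.Str.split? s " | ").getD [])

def rrCovers (forCNF : Bool) (piVars : PySem.Set String) (term : String) : Bool :=
  if forCNF then PySem.Set.issubset piVars (rrVars term)
  else PySem.Set.issubset (rrVars term) piVars

def removeRedundant_py_alt (primes : List String) (original : List String) (forCNF : Bool) :
    List String :=
  let cover := primes.map (fun pi =>
    PySem.Set.ofList (original.filter (fun t => rrCovers forCNF (rrVars pi) t)))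
  ((primes.zip cover).foldl
      (fun (st : List String × PySem.Set String) pc =>
        if PySem.Set.diff pc.2 st.2 ≠ [] then (st.1 ++ [pc.1], PySem.Set.union st.2 pc.2)
        else st)
      ([], PySem.Set.empty)).1

-- ===== PRECONDITION & SPEC =====
def Spec_removeRedundant_py (primes : List String) (original : List String) (forCNF : Bool)
    (out : List String) : Prop := out = removeRedundant_py_alt primes original forCNF
instance (primes : List String) (original : List String) (forCNF : Bool) (out : List String) :
    Decidable (Spec_removeRedundant_py primes original forCNF out) := by
  unfold Spec_removeRedundant_py; infer_instance

-- ===== CLAIM =====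
def Claim_equal_removeRedundant_py : Prop :=
  ∀ (primes : List String) (original : List String) (forCNF : Bool),
    Dom_removeRedundant_py primes original forCNF →
    Spec_removeRedundant_py primes original forCNF (removeRedundant_py primes original forCNF)

-- ===== LEMMAS AND PROOFS =====

-- A's inner loop is a filter by the coverage test
lemma rrStepA_eq (forCNF : Bool) (st : List String × List String) (pi : String) :
    rrStepA forCNF st pi =
      (let covered := st.2.filter (fun t => rrCovers forCNF (rrVars pi) t)
       if covered ≠ [] then
         (st.1 ++ [pi], st.2.filter (fun t => !(covered.contains t)))
       else st) := by
  have hbody : ∀ (acc : List String) (term : String),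
      (if forCNF then
         (if PySem.Set.issubset (PySem.Set.ofList ((PySem.Str.split? pi " | ").getD []))
              (PySem.Set.ofList ((PySem.Str.split? term " | ").getD [])) then acc ++ [term] else acc)
       else
         (if PySem.Set.issubset (PySem.Set.ofList ((PySem.Str.split? term " | ").getD []))
              (PySem.Set.ofList ((PySem.Str.split? pi " | ").getD [])) then acc ++ [term] else acc))
      = if rrCovers forCNF (rrVars pi) term then acc ++ [term] else acc := by
    intro acc term
    cases forCNF <;> rfl
  unfold rrStepA
  simp only [hbody, PySem.List.foldl_append_if_eq_filter, List.nil_append]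

-- membership-only characterisation of contains on a filtered list, for elements of the list
lemma contains_filter_self {l : List String} {p : String → Bool} {t : String} (ht : t ∈ l) :
    (l.filter p).contains t = p t := by
  by_cases h : p t = true
  · simp [List.mem_filter, ht, h]
  · simp only [Bool.not_eq_true] at h
    simp [List.mem_filter, h]

-- main invariant: A's loop on (ess, original restricted to ¬p) equals B's loop on (ess, covB)
-- whenever covB and p agree on members of original
lemma rr_loop_eq (forCNF : Bool) (original : List String) :
    ∀ (ps : List String) (ess : List String) (p : String → Bool) (covB : List String),
      (∀ t ∈ original, (covB.contains t) = p t) →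
      (ps.foldl (rrStepA forCNF) (ess, original.filter (fun t => !(p t)))).1 =
      ((ps.zip (ps.map (fun pi =>
          PySem.Set.ofList (original.filter (fun t => rrCovers forCNF (rrVars pi) t))))).foldl
        (fun (st : List String × PySem.Set String) pc =>
          if PySem.Set.diff pc.2 st.2 ≠ [] then (st.1 ++ [pc.1], PySem.Set.union st.2 pc.2)
          else st)
        (ess, covB)).1 := by
  intro ps
  induction ps with
  | nil => intro ess p covB _; simp
  | cons pi rest ih =>
    intro ess p covB hcov
    have hmemcov : ∀ t ∈ original, (t ∈ covB ↔ p t = true) := by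
      intro t ht
      rw [← List.contains_iff_mem, hcov t ht]
    -- the two step conditions agree
    have hcond :
        ((original.filter (fun t => !(p t))).filter
            (fun t => rrCovers forCNF (rrVars pi) t) ≠ []) ↔
        (PySem.Set.diff
            (PySem.Set.ofList (original.filter (fun t => rrCovers forCNF (rrVars pi) t)))
            covB ≠ []) := by
      rw [← List.isEmpty_eq_false_iff, ← List.isEmpty_eq_false_iff]
      simp only [List.isEmpty_eq_false_iff_exists_mem]
      constructor
      · rintro ⟨t, ht⟩
        simp only [List.mem_filter, Bool.not_eq_eq_eq_not, Bool.not_true] at ht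
        exact ⟨t, by
          simp only [PySem.Set.mem_diff, PySem.Set.mem_ofList, List.mem_filter]
          refine ⟨⟨ht.1.1, ht.2⟩, ?_⟩
          intro hmem
          have := (hmemcov t ht.1.1).mp hmem
          simp [this] at ht⟩
      · rintro ⟨t, ht⟩
        simp only [PySem.Set.mem_diff, PySem.Set.mem_ofList, List.mem_filter] at ht
        refine ⟨t, ?_⟩
        have hp : p t = false := by
          rcases Bool.eq_false_or_eq_true (p t) with h | h
          · exact absurd ((hmemcov t ht.1.1).mpr h) ht.2
          · exact h
        simp [List.mem_filter, ht.1.1, ht.1.2, hp]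
    -- rewrite A's new remaining list after a kept prime
    have hrem :
        (original.filter (fun t => !(p t))).filter
            (fun t => !(((original.filter (fun t => !(p t))).filter
                (fun t => rrCovers forCNF (rrVars pi) t)).contains t)) =
        original.filter (fun t => !(p t || rrCovers forCNF (rrVars pi) t)) := by
      rw [List.filter_congr (fun t ht => by
            rw [contains_filter_self ht]), List.filter_filter]
      apply List.filter_congr
      intro t _
      cases hpt : p t <;> cases hCt : rrCovers forCNF (rrVars pi) t <;> simp_all
    -- B's new covered set matches the updated predicate
    have hcov' : ∀ t ∈ original,
        ((PySem.Set.union covB (PySem.Set.ofList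
            (original.filter (fun t => rrCovers forCNF (rrVars pi) t)))).contains t)
          = (p t || rrCovers forCNF (rrVars pi) t) := by
      intro t ht
      have hmem : t ∈ PySem.Set.union covB (PySem.Set.ofList
          (original.filter (fun t => rrCovers forCNF (rrVars pi) t))) ↔
          (p t || rrCovers forCNF (rrVars pi) t) = true := by
        rw [PySem.Set.mem_union, PySem.Set.mem_ofList, List.mem_filter, Bool.or_eq_true]
        constructor
        · rintro (h | h)
          · exact Or.inl ((hmemcov t ht).mp h)
          · exact Or.inr h.2
        · rintro (h | h)
          · exact Or.inl ((hmemcov t ht).mpr h)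
          · exact Or.inr ⟨ht, h⟩
      cases h : (p t || rrCovers forCNF (rrVars pi) t) with
      | false =>
        rw [Bool.eq_false_iff]
        intro hc
        rw [PySem.Set.contains_iff] at hc
        exact absurd (hmem.mp hc) (by simp [h])
      | true =>
        rw [PySem.Set.contains_iff]
        exact hmem.mpr h
    -- unfold one step on each side
    rw [List.foldl_cons, rrStepA_eq]
    simp only [List.map_cons, List.zip_cons_cons, List.foldl_cons]
    by_cases hne : (original.filter (fun t => !(p t))).filter
        (fun t => rrCovers forCNF (rrVars pi) t) ≠ []
    · rw [if_pos hne, if_pos (hcond.mp hne), hrem]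
      exact ih (ess ++ [pi]) (fun t => p t || rrCovers forCNF (rrVars pi) t)
        (PySem.Set.union covB (PySem.Set.ofList
          (original.filter (fun t => rrCovers forCNF (rrVars pi) t)))) hcov'
    · rw [if_neg hne, if_neg (fun h => hne (hcond.mpr h))]
      exact ih ess p covB hcov

-- ===== VERDICT =====
theorem removeRedundant_py_spec : Claim_equal_removeRedundant_py := by
  intro primes original forCNF _
  unfold Spec_removeRedundant_py removeRedundant_py removeRedundant_py_alt
  have h := rr_loop_eq forCNF original primes [] (fun _ => false) []
  simpa using h (by intro t _; simp)
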